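-- pv_equiv track=rewrite | github.com/garzeah/algorithms | dp/recursive_numbers/2) memoization/minimum_jumps_with_fee.py | helper
-- ===== SOURCE A (Python) =====
-- def helper(fee, n, memo):
--     if n <= 0:
--         return 0
--
--     if n in memo:
--         return memo[n]
--
--     one_step = fee[n - 1] + helper(fee, n - 1, memo)
--     two_step = fee[n - 2] + helper(fee, n - 2, memo)
--     three_step = fee[n - 3] + helper(fee, n - 3, memo)
--     memo[n] = min(one_step, two_step, three_step)
--     return memo[n]
-- ===== SOURCE B (Python) =====
-- def helper(fee, n, memo):
--     if n <= 0:
--         return 0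
--     if n in memo:
--         return memo[n]
--     for k in range(1, n + 1):
--         if k in memo:
--             continue
--         memo[k] = min(fee[i] + (0 if i <= 0 else memo[i])
--                       for i in (k - 1, k - 2, k - 3))
--     return memo[n]
-- ===== Notes on version B (the rewrite author's own statement) =====
-- stated objective: alternative
-- what changed: Replaced A's top-down memoized recursion (three recursive calls per position, mutating the memo) by an iterative bottom-up DP loop that fills k = 1..n in order, skipping keys already in memo.
import Mathlib
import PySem

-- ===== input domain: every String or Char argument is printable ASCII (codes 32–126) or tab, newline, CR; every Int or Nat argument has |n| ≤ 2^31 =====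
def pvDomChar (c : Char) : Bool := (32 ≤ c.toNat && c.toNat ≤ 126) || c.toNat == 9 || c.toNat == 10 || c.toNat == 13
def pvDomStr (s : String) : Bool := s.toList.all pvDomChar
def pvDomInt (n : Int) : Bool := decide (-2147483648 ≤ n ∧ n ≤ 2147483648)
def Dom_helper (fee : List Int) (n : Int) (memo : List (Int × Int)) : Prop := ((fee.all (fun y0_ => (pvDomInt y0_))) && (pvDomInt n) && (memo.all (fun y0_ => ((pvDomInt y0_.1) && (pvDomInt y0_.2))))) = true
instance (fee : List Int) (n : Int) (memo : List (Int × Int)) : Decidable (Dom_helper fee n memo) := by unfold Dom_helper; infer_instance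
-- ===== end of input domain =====

-- B replaces A's top-down memoized recursion by an iterative bottom-up DP over k = 1..n.
-- A mutates the memo dict in place; the equivalence proved here is about the RETURN value only.

-- ===== PORT A =====
-- A: recursive, threading the mutated memo dict through the three recursive calls.
def helperAux (fee : List Int) (n : Int) (m : PySem.Dict Int Int) : Int × PySem.Dict Int Int :=
  if n ≤ 0 then (0, m)
  else
    match m.get? n with
    | some v => (v, m)
    | none =>
      let r1 := helperAux fee (n - 1) m
      let one_step := (PySem.List.pyGet? fee (n - 1)).getD 0 + r1.1
      let r2 := helperAux fee (n - 2) r1.2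
      let two_step := (PySem.List.pyGet? fee (n - 2)).getD 0 + r2.1
      let r3 := helperAux fee (n - 3) r2.2
      let three_step := (PySem.List.pyGet? fee (n - 3)).getD 0 + r3.1
      let best := min (min one_step two_step) three_step
      (best, r3.2.insert n best)
termination_by n.toNat
decreasing_by all_goals omega

def helper (fee : List Int) (n : Int) (memo : List (Int × Int)) : Int :=
  (helperAux fee n (PySem.Dict.ofList memo)).1

-- ===== PORT B =====
-- fee[i] + (0 if i <= 0 else memo[i])
def altCost (fee : List Int) (m : PySem.Dict Int Int) (i : Int) : Int :=
  (PySem.List.pyGet? fee i).getD 0 + (if i ≤ 0 then 0 else m.getD i 0)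

-- one iteration of B's loop body (skip keys already present)
def altStep (fee : List Int) (m : PySem.Dict Int Int) (k : Int) : PySem.Dict Int Int :=
  if m.contains k then m
  else m.insert k (min (min (altCost fee m (k - 1)) (altCost fee m (k - 2))) (altCost fee m (k - 3)))

def helper_alt (fee : List Int) (n : Int) (memo : List (Int × Int)) : Int :=
  if n ≤ 0 then 0
  else
    let d := PySem.Dict.ofList memo
    match d.get? n with
    | some v => v
    | none =>
      let t := (PySem.List.pyRange 1 (n + 1) 1).foldl (altStep fee) d
      t.getD n 0

-- ===== PRECONDITION & SPEC =====
-- Pre_ excludes exactly the inputs on which Python A raises IndexError: with 0 < n and n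
-- not a memo key, A reads fee[n-1] (needs n ≤ len(fee)) and, reaching k = 1, fee[-2] (needs 2 ≤ len(fee)).
def Pre_helper (fee : List Int) (n : Int) (memo : List (Int × Int)) : Prop :=
  n ≤ 0 ∨ (PySem.Dict.ofList memo).contains n = true ∨ (2 ≤ fee.length ∧ n ≤ (fee.length : Int))
instance (fee : List Int) (n : Int) (memo : List (Int × Int)) : Decidable (Pre_helper fee n memo) := by unfold Pre_helper; infer_instance

def pvWitness_helper : List Int × Int × (List (Int × Int)) := ([1, 2, 3], 3, [])

def Spec_helper (fee : List Int) (n : Int) (memo : List (Int × Int)) (out : Int) : Prop := out = helper_alt fee n memo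
instance (fee : List Int) (n : Int) (memo : List (Int × Int)) (out : Int) : Decidable (Spec_helper fee n memo out) := by unfold Spec_helper; infer_instance

-- ===== CLAIM (what is proved, stated in full; the proofs are below) =====
def Claim_equal_helper : Prop := ∀ (fee : List Int) (n : Int) (memo : List (Int × Int)), Dom_helper fee n memo → Pre_helper fee n memo → Spec_helper fee n memo (helper fee n memo)

-- ===== LEMMAS AND PROOFS =====

-- the common value: the minimum fee to reach n, relative to the ORIGINAL memo dict d
def hval (fee : List Int) (d : PySem.Dict Int Int) (n : Int) : Int :=
  if n ≤ 0 then 0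
  else
    match d.get? n with
    | some v => v
    | none =>
      min (min ((PySem.List.pyGet? fee (n - 1)).getD 0 + hval fee d (n - 1))
               ((PySem.List.pyGet? fee (n - 2)).getD 0 + hval fee d (n - 2)))
          ((PySem.List.pyGet? fee (n - 3)).getD 0 + hval fee d (n - 3))
termination_by n.toNat
decreasing_by all_goals omega

-- invariant: every positive entry of the working dict m equals hval, and m covers d
def GoodD (fee : List Int) (d m : PySem.Dict Int Int) : Prop :=
  (∀ j v, 0 < j → m.get? j = some v → v = hval fee d j) ∧
  (∀ j, (d.get? j).isSome → (m.get? j).isSome)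

theorem goodD_self (fee : List Int) (d : PySem.Dict Int Int) : GoodD fee d d := by
  constructor
  · intro j v hj h
    rw [hval, if_neg (by omega), h]
  · intro j h; exact h

theorem auxA_spec (fee : List Int) (d : PySem.Dict Int Int) :
    ∀ (N : Nat) (n : Int) (m : PySem.Dict Int Int), n.toNat ≤ N → GoodD fee d m →
      (helperAux fee n m).1 = hval fee d n ∧ GoodD fee d (helperAux fee n m).2 := by
  intro N
  induction N with
  | zero =>
    intro n m hN hG
    have hn : n ≤ 0 := by omega
    rw [helperAux, if_pos hn, hval, if_pos hn]
    exact ⟨rfl, hG⟩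
  | succ N ih =>
    intro n m hN hG
    by_cases hn : n ≤ 0
    · rw [helperAux, if_pos hn, hval, if_pos hn]
      exact ⟨rfl, hG⟩
    · rw [helperAux, if_neg hn]
      cases hm : m.get? n with
      | some v =>
        simp only
        exact ⟨(hG.1 n v (by omega) hm).symm ▸ (hG.1 n v (by omega) hm), hG⟩
      | none =>
        have hd : d.get? n = none := by
          cases hdn : d.get? n with
          | none => rfl
          | some w =>
            have := hG.2 n (by rw [hdn]; rfl)
            rw [hm] at this; exact absurd this (by simp)
        obtain ⟨h1, g1⟩ := ih (n - 1) m (by omega) hG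
        obtain ⟨h2, g2⟩ := ih (n - 2) _ (by omega) g1
        obtain ⟨h3, g3⟩ := ih (n - 3) _ (by omega) g2
        simp only
        rw [h1, h2, h3]
        have hvn : hval fee d n =
            min (min ((PySem.List.pyGet? fee (n - 1)).getD 0 + hval fee d (n - 1))
                     ((PySem.List.pyGet? fee (n - 2)).getD 0 + hval fee d (n - 2)))
                ((PySem.List.pyGet? fee (n - 3)).getD 0 + hval fee d (n - 3)) := by
          rw [hval, if_neg hn, hd]
        refine ⟨hvn.symm, ?_, ?_⟩
        · intro j v hj hget
          rw [PySem.Dict.get?_insert] at hget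
          by_cases hjn : j = n
          · rw [if_pos hjn] at hget
            cases hget; rw [hjn, hvn]
          · rw [if_neg hjn] at hget
            exact g3.1 j v hj hget
        · intro j hs
          rw [PySem.Dict.get?_insert]
          by_cases hjn : j = n
          · rw [if_pos hjn]; rfl
          · rw [if_neg hjn]; exact g3.2 j hs

theorem altStep_spec (fee : List Int) (d t : PySem.Dict Int Int) (c : Int) (hc : 1 ≤ c)
    (hG : GoodD fee d t) (hcov : ∀ j : Int, 1 ≤ j → j ≤ c - 1 → (t.get? j).isSome) :
    GoodD fee d (altStep fee t c) ∧ (∀ j : Int, 1 ≤ j → j ≤ c → ((altStep fee t c).get? j).isSome) := by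
  unfold altStep
  cases hct : t.contains c with
  | true =>
    rw [if_pos rfl]
    refine ⟨hG, ?_⟩
    intro j hj1 hjc
    by_cases hjeq : j = c
    · subst hjeq
      rw [← PySem.Dict.contains_eq_isSome_get?]; exact hct
    · exact hcov j hj1 (by omega)
  | false =>
    rw [if_neg (by simp)]
    have htc : t.get? c = none := by
      cases h : t.get? c with
      | none => rfl
      | some w =>
        have : t.contains c = true := by
          rw [PySem.Dict.contains_eq_isSome_get?, h]; rfl
        rw [hct] at this; exact absurd this (by simp)
    have hdc : d.get? c = none := by
      cases h : d.get? c with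
      | none => rfl
      | some w =>
        have := hG.2 c (by rw [h]; rfl)
        rw [htc] at this; exact absurd this (by simp)
    have hcost : ∀ i : Int, i ≤ c - 1 →
        altCost fee t i = (PySem.List.pyGet? fee i).getD 0 + hval fee d i := by
      intro i hi
      unfold altCost
      by_cases hi0 : i ≤ 0
      · rw [if_pos hi0, hval, if_pos hi0]
      · rw [if_neg hi0]
        have := hcov i (by omega) hi
        cases h : t.get? i with
        | none => rw [h] at this; exact absurd this (by simp)
        | some v =>
          rw [PySem.Dict.getD_eq_get?_getD, h]
          have := hG.1 i v (by omega) h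
          simp [this]
    have hvc : hval fee d c =
        min (min (altCost fee t (c - 1)) (altCost fee t (c - 2))) (altCost fee t (c - 3)) := by
      rw [hcost (c - 1) (by omega), hcost (c - 2) (by omega), hcost (c - 3) (by omega),
        hval, if_neg (by omega), hdc]
    refine ⟨⟨?_, ?_⟩, ?_⟩
    · intro j v hj hget
      rw [PySem.Dict.get?_insert] at hget
      by_cases hjc : j = c
      · rw [if_pos hjc] at hget
        cases hget; rw [hjc, hvc]
      · rw [if_neg hjc] at hget
        exact hG.1 j v hj hget
    · intro j hs
      rw [PySem.Dict.get?_insert]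
      by_cases hjc : j = c
      · rw [if_pos hjc]; rfl
      · rw [if_neg hjc]; exact hG.2 j hs
    · intro j hj1 hjc
      rw [PySem.Dict.get?_insert]
      by_cases hjeq : j = c
      · rw [if_pos hjeq]; rfl
      · rw [if_neg hjeq]; exact hcov j hj1 (by omega)

theorem auxB_spec (fee : List Int) (d : PySem.Dict Int Int) :
    ∀ (k : Nat),
      GoodD fee d ((PySem.List.pyRange 1 ((k : Int) + 1) 1).foldl (altStep fee) d) ∧
      (∀ j : Int, 1 ≤ j → j ≤ (k : Int) →
        (((PySem.List.pyRange 1 ((k : Int) + 1) 1).foldl (altStep fee) d).get? j).isSome) := by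
  intro k
  induction k with
  | zero =>
    rw [PySem.List.pyRange_one_eq_nil (by norm_num)]
    exact ⟨goodD_self fee d, by intro j hj1 hj2; omega⟩
  | succ k ih =>
    have hrange : PySem.List.pyRange 1 (((k + 1 : Nat) : Int) + 1) 1 =
        PySem.List.pyRange 1 ((k : Int) + 1) 1 ++ [(k : Int) + 1] := by
      have : (((k + 1 : Nat) : Int) + 1) = ((k : Int) + 1) + 1 := by push_cast; ring
      rw [this, PySem.List.pyRange_one_succ_right (by omega)]
    rw [hrange, List.foldl_append]
    simp only [List.foldl_cons, List.foldl_nil]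
    obtain ⟨hG, hcov⟩ := ih
    obtain ⟨hG', hcov'⟩ := altStep_spec fee d _ ((k : Int) + 1) (by omega) hG
      (by intro j hj1 hj2; exact hcov j hj1 (by omega))
    refine ⟨hG', ?_⟩
    intro j hj1 hj2
    exact hcov' j hj1 (by push_cast at hj2 ⊢; omega)

-- ===== VERDICT (by name: the statement is the Claim_ definition above) =====
theorem helper_spec : Claim_equal_helper := by
  intro fee n memo _ _
  unfold Spec_helper helper helper_alt
  by_cases hn : n ≤ 0
  · rw [helperAux, if_pos hn, if_pos hn]
  · rw [if_neg hn]
    have hA := (auxA_spec fee (PySem.Dict.ofList memo) n.toNat n (PySem.Dict.ofList memo)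
      (le_refl _) (goodD_self _ _)).1
    rw [hA]
    cases hd : (PySem.Dict.ofList memo).get? n with
    | some v =>
      simp only
      rw [hval, if_neg hn, hd]
    | none =>
      simp only
      rw [hd]
      have hcast : ((n.toNat : Int) + 1) = n + 1 := by omega
      obtain ⟨hG, hcov⟩ := auxB_spec fee (PySem.Dict.ofList memo) n.toNat
      rw [hcast] at hG hcov
      have hs := hcov n (by omega) (by omega)
      cases ht : ((PySem.List.pyRange 1 (n + 1) 1).foldl (altStep fee) (PySem.Dict.ofList memo)).get? n with
      | none => rw [ht] at hs; exact absurd hs (by simp)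
      | some v =>
        rw [PySem.Dict.getD_eq_get?_getD, ht]
        exact (hG.1 n v (by omega) ht).symm
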